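-- pv_equiv track=rewrite | github.com/zs-nemecz/longTRK2_APS_MR | coordinate_stim.py | permutation_maker
-- ===== SOURCE A (Python) =====
-- def permutation_maker (step_num):
--     permutations = []
--     for n in range(step_num):
--         permutation = [n, step_num-n]
--         permutation_reverse = [step_num-n, n]
--         if permutation not in permutations:
--             permutations.append(permutation)
--         if permutation_reverse not in permutations:
--             permutations.append(permutation_reverse)
--
--     return permutations
-- ===== SOURCE B (Python) =====
-- def permutation_maker(step_num):
--     permutations = []
--     for n in range(step_num // 2 + step_num % 2):
--         permutations.append([n, step_num - n])
--         permutations.append([step_num - n, n])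
--     if step_num > 0 and step_num % 2 == 0:
--         half = step_num // 2
--         permutations.append([half, half])
--     return permutations
-- ===== Notes on version B (the rewrite author's own statement) =====
-- stated objective: faster
-- what changed: B iterates only over the lower half of the range, emitting each pair and its reverse unconditionally and appending the midpoint pair for positive even step_num, eliminating A's O(n) 'not in' membership scans on the growing output list.
import Mathlib
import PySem

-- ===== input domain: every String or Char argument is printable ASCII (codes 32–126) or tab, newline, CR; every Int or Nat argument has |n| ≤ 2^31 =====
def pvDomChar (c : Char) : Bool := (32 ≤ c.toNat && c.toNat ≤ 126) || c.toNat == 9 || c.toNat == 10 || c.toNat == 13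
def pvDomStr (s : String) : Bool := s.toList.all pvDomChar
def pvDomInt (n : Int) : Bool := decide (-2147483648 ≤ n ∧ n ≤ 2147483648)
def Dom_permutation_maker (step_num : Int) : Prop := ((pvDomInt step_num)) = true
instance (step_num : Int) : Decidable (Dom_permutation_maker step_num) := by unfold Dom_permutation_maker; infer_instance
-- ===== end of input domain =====

-- B halves the loop and drops A's membership scans; a timing run decides the speed label.
-- ===== PORT A =====
def permutation_maker (step_num : Int) : List (List Int) :=
  (PySem.List.pyRange 0 step_num 1).foldl (fun permutations n =>
    let permutation := [n, step_num - n]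
    let permutation_reverse := [step_num - n, n]
    let permutations := if permutation ∈ permutations then permutations else permutations ++ [permutation]
    if permutation_reverse ∈ permutations then permutations else permutations ++ [permutation_reverse]) []

-- ===== PORT B =====
def permutation_maker_alt (step_num : Int) : List (List Int) :=
  let base := (PySem.List.pyRange 0 (PySem.Int.floordiv step_num 2 + PySem.Int.mod step_num 2) 1).foldl
      (fun permutations n => permutations ++ [[n, step_num - n]] ++ [[step_num - n, n]]) []
  if step_num > 0 ∧ PySem.Int.mod step_num 2 = 0 then
    base ++ [[PySem.Int.floordiv step_num 2, PySem.Int.floordiv step_num 2]]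
  else base

-- ===== PRECONDITION & SPEC =====
def Spec_permutation_maker (step_num : Int) (out : List (List Int)) : Prop := out = permutation_maker_alt step_num
instance (step_num : Int) (out : List (List Int)) : Decidable (Spec_permutation_maker step_num out) := by unfold Spec_permutation_maker; infer_instance

-- ===== CLAIM (what is proved, stated in full; the proofs are below) =====
def Claim_equal_permutation_maker : Prop := ∀ (step_num : Int), Dom_permutation_maker step_num → Spec_permutation_maker step_num (permutation_maker step_num)

-- ===== LEMMAS AND PROOFS =====

-- A's loop body as a named step function
def pvStepA (s : Int) (acc : List (List Int)) (n : Int) : List (List Int) :=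
  let p := [n, s - n]
  let q := [s - n, n]
  let acc := if p ∈ acc then acc else acc ++ [p]
  if q ∈ acc then acc else acc ++ [q]

-- the deduplicated pairs produced by the first m iterations, flat form
def pvF (s m : Int) : List (List Int) :=
  (PySem.List.pyRange 0 m 1).flatMap (fun n => [[n, s - n], [s - n, n]])

lemma pvStepA_eq (s : Int) :
    permutation_maker s = (PySem.List.pyRange 0 s 1).foldl (pvStepA s) [] := by
  rfl

lemma mem_pvF (s m : Int) (y : List Int) :
    y ∈ pvF s m ↔ ∃ n, 0 ≤ n ∧ n < m ∧ (y = [n, s - n] ∨ y = [s - n, n]) := by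
  simp [pvF, List.mem_flatMap, PySem.List.mem_pyRange_one]
  constructor
  · rintro ⟨n, ⟨h0, h1⟩, h⟩; exact ⟨n, h0, h1, by tauto⟩
  · rintro ⟨n, h0, h1, h⟩; exact ⟨n, ⟨h0, h1⟩, by tauto⟩

lemma foldl_fix {α β : Type} (step : α → β → α) (C : α) (l : List β)
    (h : ∀ n ∈ l, step C n = C) : l.foldl step C = C := by
  induction l with
  | nil => rfl
  | cons a l ih => simp only [List.foldl_cons, h a (by simp)]; exact ih (fun n hn => h n (by simp [hn]))

-- build phase: while 2m ≤ s, A's fold over range(m) yields the flat pair list pvF s m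
lemma build_phase (s : Int) (k : Nat) (hk : 2 * (k : Int) ≤ s + 1) :
    (PySem.List.pyRange 0 (k : Int) 1).foldl (pvStepA s) [] = pvF s (k : Int) := by
  induction k with
  | zero => simp [pvF]
  | succ m ih =>
      have hm : 2 * (m : Int) ≤ s + 1 := by push_cast at hk ⊢; omega
      have hstep : 2 * (m : Int) < s := by push_cast at hk; omega
      have hsplit : PySem.List.pyRange 0 ((m : Int) + 1) 1 =
          PySem.List.pyRange 0 (m : Int) 1 ++ [(m : Int)] :=
        PySem.List.pyRange_one_succ_right (by positivity)
      have hp : [(m : Int), s - m] ∉ pvF s m := by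
        rw [mem_pvF s m]
        rintro ⟨n, h0, h1, h | h⟩ <;> simp at h <;> omega
      have hq : [s - (m : Int), (m : Int)] ∉ pvF s m := by
        rw [mem_pvF s m]
        rintro ⟨n, h0, h1, h | h⟩ <;> simp at h <;> omega
      have hqp : ([s - (m : Int), (m : Int)] : List Int) ≠ [(m : Int), s - m] := by
        simp; omega
      push_cast
      rw [hsplit, List.foldl_append, ih hm]
      simp only [List.foldl_cons, List.foldl_nil, pvStepA]
      rw [if_neg hp, if_neg (by simp [hqp, hq])]
      simp [pvF, hsplit, List.flatMap_append]

-- B's build loop in flat form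
lemma altbase (s h : Int) :
    (PySem.List.pyRange 0 h 1).foldl
      (fun permutations n => permutations ++ [[n, s - n]] ++ [[s - n, n]]) [] = pvF s h := by
  simp only [List.append_assoc]
  rw [PySem.List.foldl_append_eq_flatMap]
  simp [pvF]

-- a pair with index past the midpoint is already present in the built list
lemma tail_mem (s n : Int) (hk : 2 * n > s) (hn : n < s) {m : Int} (hm : 2 * (m - 1) ≥ s - 2) :
    [n, s - n] ∈ pvF s m ∧ [s - n, n] ∈ pvF s m := by
  constructor
  · rw [mem_pvF s m]; exact ⟨s - n, by omega, by omega, Or.inr (by simp)⟩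
  · rw [mem_pvF s m]; exact ⟨s - n, by omega, by omega, Or.inl (by simp)⟩

lemma tail_step (s n : Int) (C : List (List Int))
    (hp : [n, s - n] ∈ C) (hq : [s - n, n] ∈ C) : pvStepA s C n = C := by
  simp [pvStepA, hp, hq]

theorem permutation_maker_spec : Claim_equal_permutation_maker := by
  intro s _
  unfold Spec_permutation_maker
  have hid := PySem.Int.floordiv_mul_add_mod s 2
  have hm2 : PySem.Int.mod s 2 = 0 ∨ PySem.Int.mod s 2 = 1 := by
    have := PySem.Int.mod_eq_emod_of_pos (a := s) (b := 2) (by omega)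
    omega
  set d := PySem.Int.floordiv s 2 with hd
  set r := PySem.Int.mod s 2 with hr
  rw [pvStepA_eq s]
  by_cases hspos : 0 < s
  · -- h = d + r = ceil(s/2) build iterations
    have hh0 : 0 ≤ d + r := by omega
    obtain ⟨k, hk⟩ : ∃ k : Nat, (k : Int) = d + r := ⟨(d + r).toNat, by omega⟩
    have hbuild : (PySem.List.pyRange 0 (d + r) 1).foldl (pvStepA s) [] = pvF s (d + r) := by
      rw [← hk]; exact build_phase s k (by omega)
    rcases hm2 with he | ho
    · -- even: range 0 s = range 0 d ++ [d] ++ range (d+1) s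
      have hds : d < s := by omega
      have hsplit : PySem.List.pyRange 0 s 1 =
          PySem.List.pyRange 0 d 1 ++ PySem.List.pyRange d s 1 :=
        PySem.List.pyRange_one_append 0 d s (by omega) (by omega)
      have hcons : PySem.List.pyRange d s 1 = d :: PySem.List.pyRange (d + 1) s 1 :=
        PySem.List.pyRange_one_cons hds
      have hbuild' : (PySem.List.pyRange 0 d 1).foldl (pvStepA s) [] = pvF s d := by
        rw [he] at hk hbuild; simpa using hbuild
      -- midpoint step: p = q = [d, d], appended once
      have hpnot : [d, s - d] ∉ pvF s d := by
        rw [mem_pvF s d]; rintro ⟨n, h0, h1, h | h⟩ <;> simp at h <;> omega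
      have hmid : pvStepA s (pvF s d) d = pvF s d ++ [[d, d]] := by
        simp only [pvStepA, if_neg hpnot]
        have : s - d = d := by omega
        rw [this]; simp
      have htail : (PySem.List.pyRange (d + 1) s 1).foldl (pvStepA s) (pvF s d ++ [[d, d]]) =
          pvF s d ++ [[d, d]] := by
        apply foldl_fix
        intro n hn
        rw [PySem.List.mem_pyRange_one] at hn
        obtain ⟨hmem1, hmem2⟩ := tail_mem s n (by omega) (by omega) (m := d) (by omega)
        exact tail_step s n _ (List.mem_append_left _ hmem1) (List.mem_append_left _ hmem2)
      rw [hsplit, List.foldl_append, hbuild', hcons]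
      simp only [List.foldl_cons, hmid, htail]
      unfold permutation_maker_alt
      rw [if_pos ⟨hspos, he⟩]
      rw [← hd, ← hr, he, add_zero, altbase s d]
    · -- odd: range 0 s = range 0 (d+1) ++ range (d+1) s, no midpoint
      have hsplit : PySem.List.pyRange 0 s 1 =
          PySem.List.pyRange 0 (d + r) 1 ++ PySem.List.pyRange (d + r) s 1 :=
        PySem.List.pyRange_one_append 0 (d + r) s (by omega) (by omega)
      have htail : (PySem.List.pyRange (d + r) s 1).foldl (pvStepA s) (pvF s (d + r)) =
          pvF s (d + r) := by
        apply foldl_fix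
        intro n hn
        rw [PySem.List.mem_pyRange_one] at hn
        obtain ⟨hmem1, hmem2⟩ := tail_mem s n (by omega) (by omega) (m := d + r) (by omega)
        exact tail_step s n _ hmem1 hmem2
      rw [hsplit, List.foldl_append, hbuild, htail]
      unfold permutation_maker_alt
      rw [if_neg (by rw [← hr]; omega)]
      rw [← hd, ← hr, altbase s (d + r)]
  · -- s ≤ 0: both empty
    rw [PySem.List.pyRange_one_eq_nil (by omega)]
    unfold permutation_maker_alt
    rw [if_neg (by omega), PySem.List.pyRange_one_eq_nil (by omega)]
    rfl
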